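-- pv_equiv track=rewrite | github.com/nipunramk/Reducible | Recursion/recursion.py | get_path_from_string
-- ===== SOURCE A (Python) =====
-- def get_path_from_string(string, grid):
-- 	path = [grid[0][0]]
-- 	i, j = 0, 0
-- 	for c in string:
-- 		if c == 'R':
-- 			j += 1
-- 		else:
-- 			i += 1
-- 		path.append(grid[i][j])
-- 	return path
-- ===== SOURCE B (Python) =====
-- def get_path_from_string(string, grid):
--     # Closed-form positions: after k moves, i + j == k and j == #R's seen so far.
--     # First build the list of column indices, then map positions to grid cells.
--     js = [0]
--     j = 0
--     for c in string:
--         if c == 'R':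
--             j += 1
--         js.append(j)
--     return [grid[k - j][j] for k, j in enumerate(js)]
-- ===== Notes on version B (the rewrite author's own statement) =====
-- stated objective: alternative
-- what changed: Replaces the pointer-mutating single loop with a closed-form decomposition: build the prefix-count-of-'R' list (so position k is (k-j, j)), then map positions to grid cells in a second pass.
import Mathlib
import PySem

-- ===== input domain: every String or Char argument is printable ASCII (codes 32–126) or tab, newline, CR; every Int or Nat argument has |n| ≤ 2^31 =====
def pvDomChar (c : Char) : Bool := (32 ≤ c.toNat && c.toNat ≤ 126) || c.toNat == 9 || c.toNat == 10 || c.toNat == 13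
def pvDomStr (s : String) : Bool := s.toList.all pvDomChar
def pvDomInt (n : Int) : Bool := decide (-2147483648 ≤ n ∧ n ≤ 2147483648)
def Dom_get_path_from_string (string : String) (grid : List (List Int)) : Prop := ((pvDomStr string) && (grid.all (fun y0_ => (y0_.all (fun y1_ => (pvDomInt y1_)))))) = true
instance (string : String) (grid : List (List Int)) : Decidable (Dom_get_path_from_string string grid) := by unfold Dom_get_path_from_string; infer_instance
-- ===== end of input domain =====

-- B builds the path by closed form: position k is (k - j_k, j_k) with j_k the number of
-- 'R' moves among the first k characters; it maps an enumerated prefix-count list over the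
-- grid in a second pass, instead of A's single pointer-mutating loop. Objective: alternative.


-- ===== PORT A =====
-- grid[i][j]; pyGetD's defaults are only reached where Python raises IndexError, excluded by Pre_.
def pvIdxA (grid : List (List Int)) (i j : Int) : Int :=
  PySem.List.pyGetD (PySem.List.pyGetD grid i []) j 0

def get_path_from_string (string : String) (grid : List (List Int)) : List Int :=
  (string.toList.foldl
    (fun (st : List Int × Int × Int) c =>
      if c = 'R' then (st.1 ++ [pvIdxA grid st.2.1 (st.2.2 + 1)], st.2.1, st.2.2 + 1)
      else (st.1 ++ [pvIdxA grid (st.2.1 + 1) st.2.2], st.2.1 + 1, st.2.2))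
    ([pvIdxA grid 0 0], 0, 0)).1

-- ===== PORT B =====
-- grid[k-j][j]; same remark about pyGetD's defaults as on the A side.
def pvIdxB (grid : List (List Int)) (i j : Int) : Int :=
  PySem.List.pyGetD (PySem.List.pyGetD grid i []) j 0

def get_path_from_string_alt (string : String) (grid : List (List Int)) : List Int :=
  let js := (string.toList.foldl
    (fun (st : List Int × Int) c =>
      let j := if c = 'R' then st.2 + 1 else st.2
      (st.1 ++ [j], j)) ([0], 0)).1
  (PySem.List.enumerate js).map (fun kj => pvIdxB grid (kj.1 - kj.2) kj.2)

-- ===== PRECONDITION & SPEC =====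
-- Pre_ excludes exactly the inputs where Python A raises IndexError: some visited
-- position (k - j_k, j_k), j_k = #'R' in the first k chars, falls outside the grid.
def Pre_get_path_from_string (string : String) (grid : List (List Int)) : Prop :=
  ∀ k, k ≤ string.toList.length →
    (k - (string.toList.take k).count 'R') < grid.length ∧
    (string.toList.take k).count 'R' < (grid.getD (k - (string.toList.take k).count 'R') []).length
instance (string : String) (grid : List (List Int)) : Decidable (Pre_get_path_from_string string grid) := by unfold Pre_get_path_from_string; infer_instance

def pvWitness_get_path_from_string : String × List (List Int) := ("R", [[1, 2], [3, 4]])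

def Spec_get_path_from_string (string : String) (grid : List (List Int)) (out : List Int) : Prop := out = get_path_from_string_alt string grid
instance (string : String) (grid : List (List Int)) (out : List Int) : Decidable (Spec_get_path_from_string string grid out) := by unfold Spec_get_path_from_string; infer_instance

-- ===== CLAIM (what is proved, stated in full; the proofs are below) =====
def Claim_equal_get_path_from_string : Prop := ∀ (string : String) (grid : List (List Int)), Dom_get_path_from_string string grid → Pre_get_path_from_string string grid → Spec_get_path_from_string string grid (get_path_from_string string grid)

-- ===== LEMMAS AND PROOFS =====

-- the path of cells visited after leaving position (i, j), following cs
def pathFrom (grid : List (List Int)) : Int → Int → List Char → List Int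
  | _, _, [] => []
  | i, j, c :: cs =>
    let i' := if c = 'R' then i else i + 1
    let j' := if c = 'R' then j + 1 else j
    pvIdxA grid i' j' :: pathFrom grid i' j' cs

-- the tail of B's prefix-count list (everything after the leading 0)
def jsTail : Int → List Char → List Int
  | _, [] => []
  | j, c :: cs =>
    let j' := if c = 'R' then j + 1 else j
    j' :: jsTail j' cs

theorem foldA_eq (grid : List (List Int)) : ∀ (cs : List Char) (path : List Int) (i j : Int),
    (cs.foldl
      (fun (st : List Int × Int × Int) c =>
        if c = 'R' then (st.1 ++ [pvIdxA grid st.2.1 (st.2.2 + 1)], st.2.1, st.2.2 + 1)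
        else (st.1 ++ [pvIdxA grid (st.2.1 + 1) st.2.2], st.2.1 + 1, st.2.2))
      (path, i, j)).1 = path ++ pathFrom grid i j cs
  | [], path, i, j => by simp [pathFrom]
  | c :: cs, path, i, j => by
    by_cases h : c = 'R' <;>
      simp [h, pathFrom, foldA_eq grid cs, List.append_assoc]

theorem foldB_eq : ∀ (cs : List Char) (acc : List Int) (j : Int),
    (cs.foldl
      (fun (st : List Int × Int) c =>
        let j' := if c = 'R' then st.2 + 1 else st.2
        (st.1 ++ [j'], j'))
      (acc, j)).1 = acc ++ jsTail j cs
  | [], acc, j => by simp [jsTail]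
  | c :: cs, acc, j => by
    by_cases h : c = 'R' <;>
      simp [h, jsTail, foldB_eq cs, List.append_assoc]

theorem enum_jsTail_eq (grid : List (List Int)) : ∀ (cs : List Char) (i j s : Int), s = i + j + 1 →
    (PySem.List.enumerate (jsTail j cs) s).map (fun kj => pvIdxB grid (kj.1 - kj.2) kj.2)
      = pathFrom grid i j cs
  | [], i, j, s, hs => by simp [jsTail, pathFrom, PySem.List.enumerate_nil]
  | c :: cs, i, j, s, hs => by
    by_cases h : c = 'R'
    · simp only [jsTail, pathFrom, h, ite_true, PySem.List.enumerate_cons, List.map_cons]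
      rw [enum_jsTail_eq grid cs i (j + 1) (s + 1) (by omega)]
      have : s - (j + 1) = i := by omega
      simp [pvIdxA, pvIdxB, this]
    · simp only [jsTail, pathFrom, h, ite_false, PySem.List.enumerate_cons, List.map_cons]
      rw [enum_jsTail_eq grid cs (i + 1) j (s + 1) (by omega)]
      have : s - j = i + 1 := by omega
      simp [pvIdxA, pvIdxB, this]

-- ===== VERDICT (by name: the statement is the Claim_ definition above) =====
theorem get_path_from_string_spec : Claim_equal_get_path_from_string := by
  intro string grid _ _
  unfold Spec_get_path_from_string get_path_from_string get_path_from_string_alt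
  rw [foldA_eq, foldB_eq]
  show _ = (PySem.List.enumerate ((0 : Int) :: jsTail 0 string.toList) 0).map _
  rw [PySem.List.enumerate_cons, List.map_cons,
    enum_jsTail_eq grid string.toList 0 0 (0 + 1) (by omega)]
  simp [pvIdxA, pvIdxB]
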